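-- pv_equiv track=rewrite | github.com/DEdgamer1123/Subify | src/scripts/SRT_Automatico.py | buscar_corte_natural
-- ===== SOURCE A (Python) =====
-- def buscar_corte_natural(texto):
--     """
--     Busca coma/punto como fin de oración.
--     - Primero busca coma (,)
--     - Si no hay, busca punto (.)
--     - Coma: ≥2 palabras ANTES y DESPUÉS según reglas
--     - Punto: siempre válido
--     """
--     # Primero: buscar coma (,)
--     for i, c in enumerate(texto):
--         if c == ',':
--             palabras_antes = [p for p in texto[:i].strip().split() if not p.endswith('.')]
--             despues = texto[i+1:].strip().split()
--             tiene_punto = len(despues) == 1 and despues[0].endswith('.')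
--
--             if len(palabras_antes) >= 2 and (len(despues) >= 2 or not tiene_punto):
--                 return i + 1
--
--     # Segundo: buscar punto (.)
--     for i, c in enumerate(texto):
--         if c == '.':
--             return i + 1
--
--     return -1
-- ===== SOURCE B (Python) =====
-- def buscar_corte_natural(texto):
--     # Alternative single-pass algorithm: one backward pass precomputes suffix word counts
--     # and the last non-space character; one forward pass keeps an incremental count of
--     # finished words not ending in '.', deciding each comma in O(1); the first '.' is
--     # remembered on the way.
--     n = len(texto)
--     # suf[j] = number of whitespace-separated words in texto[j:]
--     suf = [0] * (n + 1)
--     for j in range(n - 1, -1, -1):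
--         if texto[j].isspace():
--             suf[j] = suf[j + 1]
--         elif j + 1 < n and not texto[j + 1].isspace():
--             suf[j] = suf[j + 1]
--         else:
--             suf[j] = suf[j + 1] + 1
--     last_nonspace = None
--     for j in range(n - 1, -1, -1):
--         if not texto[j].isspace():
--             last_nonspace = texto[j]
--             break
--     good = 0          # finished words (before the current position) not ending in '.'
--     curr = None       # last char of the unfinished current word, None if at a gap
--     first_dot = -1
--     for i in range(n):
--         c = texto[i]
--         if c == ',':
--             antes = good + (1 if curr is not None and curr != '.' else 0)
--             d = suf[i + 1]
--             tiene_punto = d == 1 and last_nonspace == '.'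
--             if antes >= 2 and (d >= 2 or not tiene_punto):
--                 return i + 1
--         if c == '.' and first_dot == -1:
--             first_dot = i + 1
--         if c.isspace():
--             if curr is not None and curr != '.':
--                 good += 1
--             curr = None
--         else:
--             curr = c
--     return first_dot
-- ===== Notes on version B (the rewrite author's own statement) =====
-- stated objective: alternative
-- what changed: Instead of re-splitting the whole prefix and suffix at every comma, B makes one backward pass precomputing suffix word counts and the last non-space character and one forward pass maintaining the count of finished words not ending in '.', deciding each comma in O(1).
import Mathlib
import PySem

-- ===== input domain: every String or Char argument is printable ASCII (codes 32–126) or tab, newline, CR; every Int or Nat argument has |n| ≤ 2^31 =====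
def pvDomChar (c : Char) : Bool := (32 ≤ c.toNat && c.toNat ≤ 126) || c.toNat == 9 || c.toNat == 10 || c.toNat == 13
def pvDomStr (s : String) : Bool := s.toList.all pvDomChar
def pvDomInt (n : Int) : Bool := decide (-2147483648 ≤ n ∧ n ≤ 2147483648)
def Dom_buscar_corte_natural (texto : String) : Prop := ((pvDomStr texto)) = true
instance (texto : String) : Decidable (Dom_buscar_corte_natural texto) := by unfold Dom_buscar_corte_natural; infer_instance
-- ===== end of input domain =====

-- B replaces A's per-comma re-splitting of prefix and suffix by an alternative single-pass
-- algorithm: a backward pass precomputing suffix word counts and the last non-space character,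
-- then a forward pass with an incremental count of finished words not ending in '.'.
-- Proved: same return value on every input.

-- ===== PORT A =====
-- first for-loop of A: scan enumerate(texto) for a valid comma
def pvA_commaLoop (cs : List Char) : List (Int × Char) → Option Int
  | [] => none
  | (i, c) :: rest =>
    if c = ',' then
      let palabras_antes := (PySem.Chars.split₀ (PySem.Chars.strip
          (PySem.Chars.slice cs none (some i)))).filter
        (fun p => !(PySem.Chars.endswith p ['.']))
      let despues := PySem.Chars.split₀ (PySem.Chars.strip
          (PySem.Chars.slice cs (some (i + 1)) none))
      let tiene_punto := despues.length == 1 && PySem.Chars.endswith despues.headI ['.']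
      if 2 ≤ palabras_antes.length ∧ (2 ≤ despues.length ∨ tiene_punto = false) then some (i + 1)
      else pvA_commaLoop cs rest
    else pvA_commaLoop cs rest

-- second for-loop of A: first '.'
def pvA_dotLoop : List (Int × Char) → Int
  | [] => -1
  | (i, c) :: rest => if c = '.' then i + 1 else pvA_dotLoop rest

def buscar_corte_natural (texto : String) : Int :=
  let cs := texto.toList
  match pvA_commaLoop cs (PySem.List.enumerate cs 0) with
  | some r => r
  | none => pvA_dotLoop (PySem.List.enumerate cs 0)

-- ===== PORT B =====
-- Source B's backward loop filling suf[j] from suf[j+1] and texto[j], texto[j+1];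
-- rendered as the suffix recursion producing the same list suf[0..n] (same three cases, same order)
def pvB_suf : List Char → List Nat
  | [] => [0]
  | c :: rest =>
    let s := pvB_suf rest
    let v := if PySem.Chars.isspace c then s.headI
      else if (match rest with | r :: _ => !PySem.Chars.isspace r | [] => false) = true then s.headI
      else s.headI + 1
    v :: s

-- Source B's backward break-at-first-non-space loop (None while none seen yet)
def pvB_last : List Char → Option Char
  | [] => none
  | c :: rest =>
    match pvB_last rest with
    | some x => some x
    | none => if PySem.Chars.isspace c then none else some c

-- Source B's forward loop: i, good, curr, first_dot are the loop state
def pvB_loop (suf : List Nat) (last : Option Char) :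
    List Char → Nat → Nat → Option Char → Int → Int
  | [], _, _, _, firstDot => firstDot
  | c :: rest, i, good, curr, firstDot =>
    let ret? : Option Int :=
      if c = ',' then
        let antes := good + (if curr ≠ none ∧ curr ≠ some '.' then 1 else 0)
        let d := suf.getD (i + 1) 0
        let tiene_punto := d == 1 && last == some '.'
        if 2 ≤ antes ∧ (2 ≤ d ∨ tiene_punto = false) then some ((i : Int) + 1) else none
      else none
    match ret? with
    | some r => r
    | none =>
      let fd := if c = '.' ∧ firstDot = -1 then (i : Int) + 1 else firstDot
      if PySem.Chars.isspace c then
        pvB_loop suf last rest (i + 1)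
          (if curr ≠ none ∧ curr ≠ some '.' then good + 1 else good) none fd
      else
        pvB_loop suf last rest (i + 1) good (some c) fd

def buscar_corte_natural_alt (texto : String) : Int :=
  let cs := texto.toList
  pvB_loop (pvB_suf cs) (pvB_last cs) cs 0 0 none (-1)

-- ===== PRECONDITION & SPEC =====
def Spec_buscar_corte_natural (texto : String) (out : Int) : Prop := out = buscar_corte_natural_alt texto
instance (texto : String) (out : Int) : Decidable (Spec_buscar_corte_natural texto out) := by unfold Spec_buscar_corte_natural; infer_instance

-- ===== CLAIM (what is proved, stated in full; the proofs are below) =====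
def Claim_equal_buscar_corte_natural : Prop := ∀ (texto : String), Dom_buscar_corte_natural texto → Spec_buscar_corte_natural texto (buscar_corte_natural texto)

-- ===== LEMMAS AND PROOFS =====

-- "not whitespace" predicate of a word character
def pvNw (c : Char) : Bool := !(PySem.Chars.isspace c)

-- reference word splitter: what texto.split() produces, in direct recursive form
def pvWords : List Char → List (List Char)
  | [] => []
  | c :: rest =>
    if PySem.Chars.isspace c then pvWords rest
    else (c :: rest.takeWhile pvNw) :: pvWords (rest.dropWhile pvNw)
termination_by s => s.length
decreasing_by
  all_goals
    (have := List.length_dropWhile_le pvNw rest; simp only [List.length_cons]; omega)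

def pvGw (w : List Char) : Bool := !(w.getLast? == some '.')

def pvGood (p : List Char) : Nat := ((pvWords p).filter pvGw).length

def pvFlag : Option Char → Nat
  | none => 0
  | some x => if x = '.' then 0 else 1

def pvGcount : Option Char → List Char → Nat
  | cur, [] => pvFlag cur
  | cur, c :: rest =>
    if PySem.Chars.isspace c then pvFlag cur + pvGcount none rest else pvGcount (some c) rest

def pvStep (s : Nat × Option Char) (c : Char) : Nat × Option Char :=
  if PySem.Chars.isspace c then
    (if s.2 ≠ none ∧ s.2 ≠ some '.' then s.1 + 1 else s.1, none)
  else (s.1, some c)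

def pvWc : List Char → Nat
  | [] => 0
  | c :: rest =>
    if PySem.Chars.isspace c then pvWc rest
    else if (match rest with | r :: _ => !PySem.Chars.isspace r | [] => false) = true then pvWc rest
    else pvWc rest + 1

theorem pv_dropWhile_eq_cons (p : Char → Bool) (l : List Char) (x : Char) (xs : List Char)
    (h : List.dropWhile p l = x :: xs) : p x = false := by
  induction l with
  | nil => simp at h
  | cons a l ih =>
    by_cases ha : p a
    · rw [List.dropWhile_cons, if_pos ha] at h; exact ih h
    · rw [List.dropWhile_cons, if_neg ha] at h
      have : a = x := (List.cons.injEq _ _ _ _ ▸ h).1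
      rw [← this]; simpa using ha

-- ---- split₀ = pvWords ----
theorem pv_go_eq (s : List Char) : ∀ (cur : List Char) (acc : List (List Char)),
    PySem.Chars.split₀.go s cur acc =
      acc.reverse ++ (if cur.isEmpty then pvWords s
        else (cur.reverse ++ s.takeWhile pvNw) :: pvWords (s.dropWhile pvNw)) := by
  induction s with
  | nil =>
    intro cur acc
    simp only [PySem.Chars.split₀.go]
    cases cur <;> simp [pvWords]
  | cons c s ih =>
    intro cur acc
    simp only [PySem.Chars.split₀.go]
    by_cases hc : PySem.Chars.isspace c
    · cases cur <;> simp [hc, ih, pvWords, pvNw]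
    · cases cur <;> simp [hc, ih, pvWords, pvNw]

theorem pv_split₀_eq (s : List Char) : PySem.Chars.split₀ s = pvWords s := by
  show PySem.Chars.split₀.go s [] [] = pvWords s
  simp [pv_go_eq]

-- ---- strip invariance ----
theorem pv_words_nil_of_ws (t : List Char) (h : ∀ x ∈ t, PySem.Chars.isspace x = true) :
    pvWords t = [] := by
  induction t with
  | nil => simp [pvWords]
  | cons c t ih =>
    have hc := h c (by simp)
    simp [pvWords, hc]
    exact ih (fun x hx => h x (by simp [hx]))

theorem pv_takeWhile_append_ws (u t : List Char) (h : ∀ x ∈ t, PySem.Chars.isspace x = true) :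
    (u ++ t).takeWhile pvNw = u.takeWhile pvNw := by
  induction u with
  | nil =>
    cases t with
    | nil => simp
    | cons y t' => simp [List.takeWhile, pvNw, h y (by simp)]
  | cons a u ih =>
    by_cases ha : pvNw a
    · simp [List.takeWhile_cons, ha, ih]
    · simp [List.takeWhile_cons, ha]

theorem pv_dropWhile_append_ws (u t : List Char) (h : ∀ x ∈ t, PySem.Chars.isspace x = true) :
    (u ++ t).dropWhile pvNw = u.dropWhile pvNw ++ t := by
  induction u with
  | nil =>
    cases t with
    | nil => simp
    | cons y t' => simp [List.dropWhile, pvNw, h y (by simp)]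
  | cons a u ih =>
    by_cases ha : pvNw a
    · simp [List.dropWhile_cons, ha, ih]
    · simp [List.dropWhile_cons, ha]

theorem pv_words_append_ws (u t : List Char) (h : ∀ x ∈ t, PySem.Chars.isspace x = true) :
    pvWords (u ++ t) = pvWords u := by
  induction u using pvWords.induct with
  | case1 => rw [List.nil_append, pv_words_nil_of_ws t h]; simp [pvWords]
  | case2 c rest hc ih =>
    simp only [List.cons_append, pvWords, hc, if_true]
    exact ih
  | case3 c rest hc ih =>
    simp only [List.cons_append, pvWords,
      pv_takeWhile_append_ws rest t h, pv_dropWhile_append_ws rest t h]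
    simp [hc, ih]

theorem pv_words_lstrip (s : List Char) :
    pvWords (List.dropWhile PySem.Chars.isspace s) = pvWords s := by
  induction s with
  | nil => simp
  | cons c s ih =>
    by_cases hc : PySem.Chars.isspace c
    · simp [List.dropWhile_cons, hc, ih, pvWords]
    · simp [List.dropWhile_cons, hc]

theorem pv_words_strip (s : List Char) : pvWords (PySem.Chars.strip s) = pvWords s := by
  show pvWords (PySem.Chars.rstrip (PySem.Chars.lstrip s)) = pvWords s
  set l := PySem.Chars.lstrip s with hl
  have hws : ∀ x ∈ (l.reverse.takeWhile PySem.Chars.isspace).reverse, PySem.Chars.isspace x = true := by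
    intro x hx
    exact List.mem_takeWhile_imp (List.mem_reverse.mp hx)
  have hsplit : PySem.Chars.rstrip l ++ (l.reverse.takeWhile PySem.Chars.isspace).reverse = l := by
    have h0 := List.takeWhile_append_dropWhile (p := PySem.Chars.isspace) (l := l.reverse)
    simp only [PySem.Chars.rstrip]
    rw [← List.reverse_append, h0, List.reverse_reverse]
  have h1 : pvWords (PySem.Chars.rstrip l) = pvWords l := by
    conv_rhs => rw [← hsplit]
    exact (pv_words_append_ws _ _ hws).symm
  rw [h1, hl]
  exact pv_words_lstrip s

theorem pv_words_ne_nil (t : List Char) : ∀ w ∈ pvWords t, w ≠ [] := by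
  induction t using pvWords.induct with
  | case1 => simp [pvWords]
  | case2 c rest hc ih => simpa [pvWords, hc] using ih
  | case3 c rest hc ih =>
    intro w hw
    have hstep : pvWords (c :: rest) =
        (c :: rest.takeWhile pvNw) :: pvWords (rest.dropWhile pvNw) := by
      rw [pvWords]; simp [hc]
    rw [hstep] at hw
    rcases List.mem_cons.mp hw with h | h
    · rw [h]; simp
    · exact ih w h

-- ---- word counts ----
theorem pv_wc_run (rest : List Char) : ∀ c, PySem.Chars.isspace c = false →
    pvWc (c :: rest) = pvWc (rest.dropWhile pvNw) + 1 := by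
  induction rest with
  | nil => intro c hc; simp [pvWc, hc]
  | cons r rest' ih =>
    intro c hc
    by_cases hr : PySem.Chars.isspace r
    · simp [pvWc, hc, hr, List.dropWhile_cons, pvNw]
    · have h1 : pvWc (c :: r :: rest') = pvWc (r :: rest') := by
        simp [pvWc, hc, hr]
      rw [h1, ih r (by simp [hr]), List.dropWhile_cons]
      simp [pvNw, hr]

theorem pv_wc_eq (t : List Char) : pvWc t = (pvWords t).length := by
  induction t using pvWords.induct with
  | case1 => simp [pvWc, pvWords]
  | case2 c rest hc ih => simp [pvWc, pvWords, hc, ih]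
  | case3 c rest hc ih =>
    rw [pv_wc_run rest c (by simpa using hc)]
    simp [pvWords, hc, ih]

theorem pv_headI_getD (l : List Nat) : l.headI = l.getD 0 0 := by cases l <;> rfl

theorem pv_suf_getD (cs : List Char) : ∀ j, (pvB_suf cs).getD j 0 = pvWc (cs.drop j) := by
  induction cs with
  | nil => intro j; cases j <;> simp [pvB_suf, pvWc]
  | cons c rest ih =>
    intro j
    cases j with
    | zero =>
      show ((pvB_suf (c :: rest)).getD 0 0) = pvWc (c :: rest)
      have hh : (pvB_suf rest).headI = pvWc rest := by
        rw [pv_headI_getD]; simpa using ih 0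
      simp only [pvB_suf, List.getD_cons_zero, pvWc, hh]
    | succ j' =>
      simp only [pvB_suf, List.getD_cons_succ, List.drop_succ_cons]
      exact ih j'

-- ---- last non-space character ----
theorem pv_last_append (u t : List Char) :
    pvB_last (u ++ t) = match pvB_last t with | some x => some x | none => pvB_last u := by
  induction u with
  | nil => cases h : pvB_last t <;> simp [pvB_last, h]
  | cons a u ih =>
    simp only [List.cons_append, pvB_last, ih]
    cases h : pvB_last t <;> cases h2 : pvB_last u <;> simp [h, h2]

theorem pv_last_run (u : List Char) (h : ∀ x ∈ u, PySem.Chars.isspace x = false) :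
    pvB_last u = u.getLast? := by
  induction u with
  | nil => simp [pvB_last]
  | cons a u ih =>
    have ha := h a (by simp)
    rw [pvB_last]
    rw [ih (fun x hx => h x (by simp [hx]))]
    cases u with
    | nil => simp [ha]
    | cons b u' =>
      have hne : (b :: u').getLast? ≠ none := by simp
      cases hg : (b :: u').getLast? with
      | none => exact absurd hg hne
      | some y => exact hg.symm

theorem pv_last_eq (t : List Char) :
    pvB_last t = ((pvWords t).getLast?).bind List.getLast? := by
  induction t using pvWords.induct with
  | case1 => simp [pvB_last, pvWords]
  | case2 c rest hc ih =>
    have h1 : pvB_last (c :: rest) = pvB_last rest := by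
      rw [pvB_last]
      cases h : pvB_last rest
      · simp [hc]
      · rfl
    rw [h1, ih]
    have : pvWords (c :: rest) = pvWords rest := by rw [pvWords]; simp [hc]
    rw [this]
  | case3 c rest hc ih =>
    have hsp := List.takeWhile_append_dropWhile (p := pvNw) (l := rest)
    have htw : ∀ x ∈ rest.takeWhile pvNw, PySem.Chars.isspace x = false := by
      intro x hx; simpa [pvNw] using List.mem_takeWhile_imp hx
    have hwords : pvWords (c :: rest) =
        (c :: rest.takeWhile pvNw) :: pvWords (rest.dropWhile pvNw) := by
      rw [pvWords]; simp [hc]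
    have h1 : pvB_last (c :: rest) =
        match pvB_last rest with | some x => some x | none => some c := by
      rw [pvB_last]
      cases h : pvB_last rest
      · simp [hc]
      · rfl
    have h2 : pvB_last rest =
        match pvB_last (rest.dropWhile pvNw) with
        | some x => some x
        | none => (rest.takeWhile pvNw).getLast? := by
      conv_lhs => rw [← hsp]
      rw [pv_last_append, pv_last_run _ htw]
    rw [h1, h2, hwords, ih]
    by_cases hnil : pvWords (rest.dropWhile pvNw) = []
    · rw [hnil]
      cases hg : (rest.takeWhile pvNw).getLast? <;>
        simp [hg, List.getLast?_cons, List.getLastD_eq_getLast?]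
    · obtain ⟨wl, hwl⟩ : ∃ wl, (pvWords (rest.dropWhile pvNw)).getLast? = some wl := by
        cases hh : (pvWords (rest.dropWhile pvNw)).getLast? with
        | none => exact absurd (List.getLast?_eq_none_iff.mp hh) hnil
        | some wl => exact ⟨wl, rfl⟩
      have hwlmem : wl ∈ pvWords (rest.dropWhile pvNw) := by
        obtain ⟨ys, hys⟩ := List.getLast?_eq_some_iff.mp hwl
        rw [hys]; simp
      obtain ⟨y, hy⟩ : ∃ y, wl.getLast? = some y := by
        cases hh : wl.getLast? with
        | none => exact absurd (List.getLast?_eq_none_iff.mp hh) (pv_words_ne_nil _ wl hwlmem)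
        | some y => exact ⟨y, rfl⟩
      have hlast : ((c :: rest.takeWhile pvNw) :: pvWords (rest.dropWhile pvNw)).getLast? =
          (pvWords (rest.dropWhile pvNw)).getLast? := by
        cases hh : pvWords (rest.dropWhile pvNw) with
        | nil => exact absurd hh hnil
        | cons a l => simp [List.getLast?_cons]
      rw [hlast, hwl]
      simp [hy]

-- ---- good-word counting ----
theorem pv_gcount_run (tw : List Char) (h : ∀ x ∈ tw, PySem.Chars.isspace x = false) :
    ∀ (x : Char) (r : List Char), pvGcount (some x) (tw ++ r) = pvGcount (some (tw.getLastD x)) r := by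
  induction tw with
  | nil => intro x r; simp
  | cons a tw' ih =>
    intro x r
    have ha := h a (by simp)
    simp only [List.cons_append, pvGcount, ha, if_false, List.getLastD_cons]
    exact ih (fun z hz => h z (by simp [hz])) a r

theorem pv_flag_getLastD (c : Char) (tw : List Char) :
    pvFlag (some (tw.getLastD c)) = (if pvGw (c :: tw) then 1 else 0) := by
  have h : (c :: tw).getLast? = some (tw.getLastD c) := by
    rw [List.getLast?_cons]
    cases h : tw.getLast? with
    | none =>
      have : tw = [] := List.getLast?_eq_none_iff.mp h
      simp [this]
    | some y =>
      obtain ⟨ys, rfl⟩ := List.getLast?_eq_some_iff.mp h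
      simp [List.getLastD_eq_getLast?, h]
  by_cases hy : tw.getLastD c = '.'
  · simp [pvFlag, hy, pvGw, h]
  · simp [pvFlag, hy, pvGw, h]

theorem pv_gcount_eq (p : List Char) : pvGcount none p = pvGood p := by
  induction p using pvWords.induct with
  | case1 => simp [pvGcount, pvGood, pvWords, pvFlag]
  | case2 c rest hc ih => simp [pvGcount, hc, pvFlag, pvGood, pvWords, ih]
  | case3 c rest hc ih =>
    have hsp := List.takeWhile_append_dropWhile (p := pvNw) (l := rest)
    have htw : ∀ x ∈ rest.takeWhile pvNw, PySem.Chars.isspace x = false := by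
      intro x hx; simpa [pvNw] using List.mem_takeWhile_imp hx
    have h1 : pvGcount none (c :: rest) = pvGcount (some c) rest := by simp [pvGcount, hc]
    have h2 : pvGcount (some c) rest =
        pvGcount (some ((rest.takeWhile pvNw).getLastD c)) (rest.dropWhile pvNw) := by
      conv_lhs => rw [← hsp]
      exact pv_gcount_run _ htw c _
    have hgood : pvGood (c :: rest) =
        (if pvGw (c :: rest.takeWhile pvNw) then 1 else 0) + pvGood (rest.dropWhile pvNw) := by
      simp only [pvGood, pvWords, hc, Bool.false_eq_true, if_false, List.filter_cons]
      by_cases hg : pvGw (c :: rest.takeWhile pvNw) <;> simp [hg] <;> omega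
    rw [h1, h2, hgood, ← pv_flag_getLastD]
    generalize hdw2 : rest.dropWhile pvNw = dw at ih ⊢
    cases dw with
    | nil => simp [pvGcount, pvGood, pvWords]
    | cons d dw' =>
      have hd : PySem.Chars.isspace d = true := by
        have := pv_dropWhile_eq_cons pvNw rest d dw' hdw2
        simpa [pvNw] using this
      have e1 : pvGcount none (d :: dw') = pvGcount none dw' := by simp [pvGcount, hd, pvFlag]
      calc pvGcount (some ((rest.takeWhile pvNw).getLastD c)) (d :: dw')
          = pvFlag (some ((rest.takeWhile pvNw).getLastD c)) + pvGcount none dw' := by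
            simp [pvGcount, hd]
        _ = pvFlag (some ((rest.takeWhile pvNw).getLastD c)) + pvGcount none (d :: dw') := by
            rw [e1]
        _ = pvFlag (some ((rest.takeWhile pvNw).getLastD c)) + pvGood (d :: dw') := by rw [ih]

theorem pv_state_spec (p : List Char) : ∀ (g : Nat) (cur : Option Char),
    (List.foldl pvStep (g, cur) p).1 + pvFlag (List.foldl pvStep (g, cur) p).2 =
      g + pvGcount cur p := by
  induction p with
  | nil => intro g cur; simp [pvGcount]
  | cons c p ih =>
    intro g cur
    by_cases hc : PySem.Chars.isspace c
    · have hstep : pvStep (g, cur) c = (if cur ≠ none ∧ cur ≠ some '.' then g + 1 else g, none) := by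
        simp [pvStep, hc]
      have hflag : (if cur ≠ none ∧ cur ≠ some '.' then g + 1 else g) = g + pvFlag cur := by
        match cur with
        | none => simp [pvFlag]
        | some x => by_cases hx : x = '.' <;> simp [pvFlag, hx]
      simp only [List.foldl_cons, hstep, ih, pvGcount, hc, if_true, hflag]
      omega
    · have hstep : pvStep (g, cur) c = (g, some c) := by simp [pvStep, hc]
      simp [List.foldl_cons, hstep, ih, pvGcount, hc]

-- ---- endswith('.') is a last-character test ----
theorem pv_endswith_dot (w : List Char) :
    PySem.Chars.endswith w ['.'] = (w.getLast? == some '.') := by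
  rw [Bool.eq_iff_iff, PySem.Chars.endswith_iff, beq_iff_eq, List.getLast?_eq_some_iff]
  constructor
  · rintro ⟨t, rfl⟩; exact ⟨t, rfl⟩
  · rintro ⟨t, rfl⟩; exact ⟨t, rfl⟩

theorem pv_filter_gw (l : List (List Char)) :
    l.filter (fun p => !(PySem.Chars.endswith p ['.'])) = l.filter pvGw := by
  apply List.filter_congr
  intro w _
  rw [pv_endswith_dot]; rfl

-- ---- the main loop correspondence ----
theorem pv_dot_cons (i : Int) (c : Char) (rest : List Char) :
    pvA_dotLoop (PySem.List.enumerate (c :: rest) i) =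
      (if c = '.' then i + 1 else pvA_dotLoop (PySem.List.enumerate rest (i + 1))) := by
  rw [PySem.List.enumerate_cons, pvA_dotLoop]

theorem pv_loop_eq (cs : List Char) : ∀ (rest p : List Char) (good : Nat) (curr : Option Char) (fd : Int),
    cs = p ++ rest →
    (good, curr) = List.foldl pvStep (0, none) p →
    ((fd = -1 ∧ pvA_dotLoop (PySem.List.enumerate cs 0) =
        pvA_dotLoop (PySem.List.enumerate rest (p.length : Int))) ∨
      (fd ≠ -1 ∧ pvA_dotLoop (PySem.List.enumerate cs 0) = fd)) →
    pvB_loop (pvB_suf cs) (pvB_last cs) rest p.length good curr fd =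
      match pvA_commaLoop cs (PySem.List.enumerate rest (p.length : Int)) with
      | some r => r
      | none => pvA_dotLoop (PySem.List.enumerate cs 0) := by
  intro rest
  induction rest with
  | nil =>
    intro p good curr fd hcs hst hfd
    rw [PySem.List.enumerate_nil]
    show fd = _
    rcases hfd with ⟨hfd1, hfd2⟩ | ⟨_, hfd2⟩
    · rw [PySem.List.enumerate_nil] at hfd2
      simp [pvA_commaLoop, hfd2, pvA_dotLoop, hfd1]
    · simp [pvA_commaLoop, hfd2]
  | cons c rest' ih =>
    intro p good curr fd hcs hst hfd
    rw [PySem.List.enumerate_cons]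
    -- shared facts
    have htake : PySem.Chars.slice cs none (some (p.length : Int)) = p := by
      rw [PySem.Chars.slice_eq_listSlice, PySem.List.slice_to cs (by positivity)]
      rw [Int.toNat_natCast, hcs, List.take_left]
    have hdrop : PySem.Chars.slice cs (some ((p.length : Int) + 1)) none = rest' := by
      rw [PySem.Chars.slice_eq_listSlice]
      have h1 : ((p.length : Int) + 1) = ((p.length + 1 : Nat) : Int) := by push_cast; ring
      rw [h1, PySem.List.slice_from cs (by positivity), Int.toNat_natCast]
      have h2 : cs = (p ++ [c]) ++ rest' := by rw [hcs]; simp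
      rw [h2]
      have hlen : p.length + 1 = (p ++ [c]).length := by simp
      rw [hlen, List.drop_left]
    have hantes : good + (if curr ≠ none ∧ curr ≠ some '.' then 1 else 0) = pvGood p := by
      have h1 := pv_state_spec p 0 none
      rw [← hst] at h1
      have h2 : (if curr ≠ none ∧ curr ≠ some '.' then 1 else 0) = pvFlag curr := by
        match curr with
        | none => simp [pvFlag]
        | some x => by_cases hx : x = '.' <;> simp [pvFlag, hx]
      rw [h2]
      simp only at h1
      rw [h1, pv_gcount_eq]
      omega
    have hA_antes : ((PySem.Chars.split₀ (PySem.Chars.strip p)).filter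
        (fun w => !(PySem.Chars.endswith w ['.']))).length = pvGood p := by
      rw [pv_split₀_eq, pv_words_strip, pv_filter_gw]
      rfl
    -- state update facts
    have hst' : ∀ (_ : PySem.Chars.isspace c = false),
        ((good : Nat), (some c : Option Char)) = List.foldl pvStep (0, none) (p ++ [c]) := by
      intro hc2
      rw [List.foldl_append, ← hst]
      simp [pvStep, hc2]
    have hstw : ∀ (_ : PySem.Chars.isspace c = true),
        ((if curr ≠ none ∧ curr ≠ some '.' then good + 1 else good : Nat), (none : Option Char)) =
          List.foldl pvStep (0, none) (p ++ [c]) := by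
      intro hc2
      rw [List.foldl_append, ← hst]
      simp [pvStep, hc2]
    have hcs' : cs = (p ++ [c]) ++ rest' := by rw [hcs]; simp
    have hlen' : (p ++ [c]).length = p.length + 1 := by simp
    have hcast : ((p.length + 1 : Nat) : Int) = (p.length : Int) + 1 := by push_cast; ring
    -- dot bookkeeping for the recursive case
    have hfd' : ∀ fdn : Int, fdn = (if c = '.' ∧ fd = -1 then (p.length : Int) + 1 else fd) →
        ((fdn = -1 ∧ pvA_dotLoop (PySem.List.enumerate cs 0) =
            pvA_dotLoop (PySem.List.enumerate rest' ((p.length : Int) + 1))) ∨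
          (fdn ≠ -1 ∧ pvA_dotLoop (PySem.List.enumerate cs 0) = fdn)) := by
      intro fdn hfdn
      rcases hfd with ⟨h1, h2⟩ | ⟨h1, h2⟩
      · rw [pv_dot_cons] at h2
        by_cases hcd : c = '.'
        · right
          constructor
          · rw [hfdn]; simp [hcd, h1]; omega
          · rw [hfdn]; simp [hcd, h1]; rw [h2]; simp [hcd]
        · left
          constructor
          · rw [hfdn]; simp [hcd, h1]
          · rw [h2]; simp [hcd]
      · right
        constructor
        · rw [hfdn]; simp [h1]
        · rw [hfdn]; simp [h1, h2]
    -- the specialised induction hypothesis for p ++ [c]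
    have ih' := ih (p ++ [c])
    rw [hlen', hcast] at ih'
    by_cases hc : c = ','
    · -- comma: the two validity tests coincide
      rw [pvA_commaLoop, pvB_loop]
      simp only [hc, if_true, htake, hdrop]
      set despues := PySem.Chars.split₀ (PySem.Chars.strip rest') with hdesp
      have hdval : (pvB_suf cs).getD (p.length + 1) 0 = despues.length := by
        rw [pv_suf_getD, hdesp, pv_split₀_eq, pv_words_strip]
        have h2 : cs.drop (p.length + 1) = rest' := by
          rw [hcs']
          have hlen : p.length + 1 = (p ++ [c]).length := by simp
          rw [hlen, List.drop_left]
        rw [h2, pv_wc_eq]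
      have htp : (despues.length == 1 && (pvB_last cs == some '.')) =
          (despues.length == 1 && PySem.Chars.endswith despues.headI ['.']) := by
        by_cases h1 : despues.length = 1
        · obtain ⟨w, hw⟩ : ∃ w, despues = [w] := by
            rcases hd2 : despues with _ | ⟨a, _ | ⟨b, r3⟩⟩
            · rw [hd2] at h1; simp at h1
            · exact ⟨a, rfl⟩
            · rw [hd2] at h1; simp at h1
          have hwordsr : pvWords rest' = [w] := by
            rw [hdesp, pv_split₀_eq, pv_words_strip] at hw; exact hw
          have hwne : w ≠ [] := pv_words_ne_nil rest' w (by simp [hwordsr])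
          obtain ⟨y, hy⟩ : ∃ y, w.getLast? = some y := by
            cases hh : w.getLast? with
            | none => exact absurd (List.getLast?_eq_none_iff.mp hh) hwne
            | some y => exact ⟨y, rfl⟩
          have hlastcs : pvB_last cs = some y := by
            rw [hcs', pv_last_append, pv_last_eq rest', hwordsr]
            simp [hy]
          rw [hw, hlastcs]
          simp [pv_endswith_dot, hy, List.headI]
        · have hne1 : (despues.length == 1) = false := by simpa using h1
          rw [hne1]
          simp
      have hcond : (2 ≤ good + (if curr ≠ none ∧ curr ≠ some '.' then 1 else 0) ∧
            (2 ≤ (pvB_suf cs).getD (p.length + 1) 0 ∨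
              ((pvB_suf cs).getD (p.length + 1) 0 == 1 && (pvB_last cs == some '.')) = false)) ↔
          (2 ≤ ((PySem.Chars.split₀ (PySem.Chars.strip p)).filter
              (fun w => !(PySem.Chars.endswith w ['.']))).length ∧
            (2 ≤ despues.length ∨
              (despues.length == 1 && PySem.Chars.endswith despues.headI ['.']) = false)) := by
        rw [hantes, hA_antes, hdval, htp]
      by_cases hv : 2 ≤ good + (if curr ≠ none ∧ curr ≠ some '.' then 1 else 0) ∧
          (2 ≤ (pvB_suf cs).getD (p.length + 1) 0 ∨
            ((pvB_suf cs).getD (p.length + 1) 0 == 1 && (pvB_last cs == some '.')) = false)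
      · rw [if_pos hv, if_pos (hcond.mp hv)]
      · rw [if_neg hv, if_neg (fun h => hv (hcond.mpr h))]
        have hc2 : PySem.Chars.isspace c = false := by rw [hc]; decide
        have hrec := ih' good (some c) fd hcs' (hst' hc2) (by
          apply hfd' fd
          rw [hc]
          simp)
        simp only [hc2, Bool.false_eq_true, if_false] at hrec ⊢
        simp only [hc] at hrec
        exact hrec
    · -- not a comma: both sides just move on
      rw [pvA_commaLoop, pvB_loop]
      simp only [hc, if_false]
      by_cases hc2 : PySem.Chars.isspace c
      · have hrec := ih'
          (if curr ≠ none ∧ curr ≠ some '.' then good + 1 else good) none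
          (if c = '.' ∧ fd = -1 then (p.length : Int) + 1 else fd)
          hcs' (hstw hc2) (hfd' _ rfl)
        simp only [hc2, if_true]
        exact hrec
      · have hc2' : PySem.Chars.isspace c = false := by simpa using hc2
        have hrec := ih' good (some c)
          (if c = '.' ∧ fd = -1 then (p.length : Int) + 1 else fd)
          hcs' (hst' hc2') (hfd' _ rfl)
        simp only [hc2', Bool.false_eq_true, if_false]
        exact hrec


-- ===== VERDICT (by name: the statement is the Claim_ definition above) =====
theorem buscar_corte_natural_spec : Claim_equal_buscar_corte_natural := by
  intro texto _
  show buscar_corte_natural texto = buscar_corte_natural_alt texto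
  unfold buscar_corte_natural buscar_corte_natural_alt
  have h := pv_loop_eq texto.toList texto.toList [] 0 none (-1) rfl rfl
    (Or.inl ⟨rfl, by norm_num⟩)
  simp only [List.length_nil, Nat.cast_zero] at h
  rw [h]
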